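-- pv_equiv track=rewrite | github.com/Roushelfy/WhoDesigned | myutils.py | divide_suit
-- ===== SOURCE A (Python) =====
-- def divide_suit(tgt):
--     #把某种花色分为单牌和对子
--     singles = []
--     pairs = []
--     for card in tgt:
--         #如果有两张
--         if tgt.count(card) == 2 and card not in pairs:
--             pairs.append(card)
--         if card not in singles:
--             singles.append(card)
--     return singles, pairs
-- ===== SOURCE B (Python) =====
-- def divide_suit(tgt):
--     # Sort a copy; a value is a pair exactly when its run in the sorted copy has length 2.
--     srt = sorted(tgt)
--     doubles = set()
--     i = 0
--     n = len(srt)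
--     while i < n:
--         j = i + 1
--         while j < n and srt[j] == srt[i]:
--             j += 1
--         if j - i == 2:
--             doubles.add(srt[i])
--         i = j
--     singles = []
--     seen = set()
--     for card in tgt:
--         if card not in seen:
--             seen.add(card)
--             singles.append(card)
--     pairs = [c for c in singles if c in doubles]
--     return singles, pairs
-- ===== Notes on version B (the rewrite author's own statement) =====
-- stated objective: faster
-- what changed: A rescans the whole list with tgt.count and membership tests inside its loop (quadratic); B sorts a copy and extracts pair cards as the values whose maximal run in the sorted copy has length exactly 2, then emits singles by a seen-set dedup pass and pairs by filtering singles against that run-length set.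
import Mathlib
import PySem

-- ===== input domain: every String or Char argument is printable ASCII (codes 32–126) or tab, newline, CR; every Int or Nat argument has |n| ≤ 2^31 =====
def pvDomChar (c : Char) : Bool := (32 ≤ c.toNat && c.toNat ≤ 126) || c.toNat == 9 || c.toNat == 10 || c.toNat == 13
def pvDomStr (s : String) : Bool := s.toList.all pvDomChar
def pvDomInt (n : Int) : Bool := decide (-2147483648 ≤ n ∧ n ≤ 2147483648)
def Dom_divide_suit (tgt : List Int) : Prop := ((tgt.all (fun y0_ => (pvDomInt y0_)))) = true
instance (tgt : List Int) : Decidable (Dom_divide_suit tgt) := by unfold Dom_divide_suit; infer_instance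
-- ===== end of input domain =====

-- B replaces A's per-element whole-list rescans with a sort of a copy followed by a run-length
-- scan of the sorted copy (a run of length exactly 2 names a pair) — objective: faster.

-- ===== PORT A =====
def divide_suit (tgt : List Int) : List Int × List Int :=
  let r := tgt.foldl (fun (st : List Int × List Int) card =>
    let pairs := if PySem.List.count tgt card == 2 && !st.2.contains card
                 then st.2 ++ [card] else st.2
    let singles := if !st.1.contains card then st.1 ++ [card] else st.1
    (singles, pairs)) ([], [])
  r

-- ===== PORT B =====
-- the outer while loop of Source B: for each maximal run of equal values in srt, emit the
-- run's value when the run has length exactly 2 (j - i == 2), then jump to the run's end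
def runDoubles : List Int → List Int
  | [] => []
  | c :: rest =>
    (if (rest.takeWhile (fun x => x == c)).length + 1 = 2 then [c] else [])
      ++ runDoubles (rest.dropWhile (fun x => x == c))
termination_by l => l.length
decreasing_by
  simp only [List.length_cons]
  exact Nat.lt_succ_of_le (List.length_dropWhile_le _ _)

def divide_suit_alt (tgt : List Int) : List Int × List Int :=
  let srt := PySem.List.sorted tgt (fun x => x) false
  let doubles := runDoubles srt
  let st := tgt.foldl (fun (st : List Int × PySem.Set Int) card =>
      if PySem.Set.contains st.2 card then st
      else (st.1 ++ [card], PySem.Set.add st.2 card)) ([], PySem.Set.empty)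
  let singles := st.1
  let pairs := singles.filter (fun c => doubles.contains c)
  (singles, pairs)

-- ===== PRECONDITION & SPEC =====
def Spec_divide_suit (tgt : List Int) (out : List Int × List Int) : Prop := out = divide_suit_alt tgt
instance (tgt : List Int) (out : List Int × List Int) : Decidable (Spec_divide_suit tgt out) := by unfold Spec_divide_suit; infer_instance

-- ===== CLAIM (what is proved, stated in full; the proofs are below) =====
def Claim_equal_divide_suit : Prop := ∀ (tgt : List Int), Dom_divide_suit tgt → Spec_divide_suit tgt (divide_suit tgt)

-- ===== LEMMAS AND PROOFS =====

-- A's loop invariant: with the pairs component kept as the filter of the singles component,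
-- one step of A's fold is one PySem.Set.add step on the singles side.
theorem divide_suit_loop_inv (tgt : List Int) (l : List Int) : ∀ (s : List Int),
    l.foldl (fun (st : List Int × List Int) card =>
      ((if (!st.1.contains card) = true then st.1 ++ [card] else st.1),
       (if (PySem.List.count tgt card == 2 && !st.2.contains card) = true
        then st.2 ++ [card] else st.2)))
      (s, s.filter (fun c => PySem.List.count tgt c == 2))
    = (l.foldl PySem.Set.add s,
       (l.foldl PySem.Set.add s).filter (fun c => PySem.List.count tgt c == 2)) := by
  induction l with
  | nil => intro s; simp
  | cons c l ih =>
    intro s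
    have hc : (s.filter (fun x => PySem.List.count tgt x == 2)).contains c
        = (s.contains c && (PySem.List.count tgt c == 2)) := by
      by_cases h : c ∈ s <;> by_cases h2 : List.count c tgt = 2 <;>
        simp [List.mem_filter, PySem.List.count, h, h2]
    have hstep : ((if (!s.contains c) = true then s ++ [c] else s),
        (if (PySem.List.count tgt c == 2 && !(s.filter (fun x => PySem.List.count tgt x == 2)).contains c) = true
         then s.filter (fun x => PySem.List.count tgt x == 2) ++ [c]
         else s.filter (fun x => PySem.List.count tgt x == 2)))
        = (PySem.Set.add s c,
           (PySem.Set.add s c).filter (fun x => PySem.List.count tgt x == 2)) := by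
      rw [hc, Prod.mk.injEq]
      refine ⟨?_, ?_⟩
      · by_cases h : c ∈ s <;> simp [PySem.Set.add, h]
      · by_cases h : c ∈ s <;> by_cases h2 : List.count c tgt = 2 <;>
          simp [PySem.Set.add, PySem.List.count, h, h2, List.filter_append]
    simp only [List.foldl_cons]
    rw [hstep]
    exact ih (PySem.Set.add s c)

-- B's dedup loop: seen and singles hold the same elements, so the paired fold is the Set.add fold twice
theorem alt_dedup_inv (l : List Int) : ∀ (s : List Int),
    l.foldl (fun (st : List Int × PySem.Set Int) card =>
      if PySem.Set.contains st.2 card then st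
      else (st.1 ++ [card], PySem.Set.add st.2 card)) (s, s)
    = (l.foldl PySem.Set.add s, l.foldl PySem.Set.add s) := by
  induction l with
  | nil => intro s; rfl
  | cons c l ih =>
    intro s
    simp only [List.foldl_cons]
    by_cases h : c ∈ s
    · have h1 : PySem.Set.contains s c = true := by simp [PySem.Set.contains, h]
      have h2 : PySem.Set.add s c = s := by simp [PySem.Set.add, PySem.Set.contains, h]
      rw [if_pos h1, h2, ih s]
    · have h1 : ¬ PySem.Set.contains s c = true := by simp [PySem.Set.contains, h]
      have h2 : PySem.Set.add s c = s ++ [c] := by simp [PySem.Set.add, PySem.Set.contains, h]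
      rw [if_neg h1, h2, ih (s ++ [c])]

theorem runDoubles_subset (l : List Int) : ∀ x ∈ runDoubles l, x ∈ l := by
  induction l using runDoubles.induct with
  | case1 => intro x hx; simp [runDoubles] at hx
  | case2 c rest ih =>
    intro x hx
    rw [runDoubles] at hx
    rcases List.mem_append.1 hx with h | h
    · split at h <;> simp_all
    · exact List.mem_cons_of_mem _ ((rest.dropWhile_sublist (fun x => x == c)).mem (ih x h))

-- run-length characterisation: in a (≤)-sorted list, membership in runDoubles is count = 2
theorem mem_runDoubles_iff_count (l : List Int) (hs : l.Pairwise (· ≤ ·)) (x : Int) :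
    x ∈ runDoubles l ↔ List.count x l = 2 := by
  induction l using runDoubles.induct with
  | case1 => simp [runDoubles]
  | case2 c rest ih =>
    have hrest : rest = rest.takeWhile (fun x => x == c) ++ rest.dropWhile (fun x => x == c) :=
      (List.takeWhile_append_dropWhile).symm
    have htake : ∀ y ∈ rest.takeWhile (fun x => x == c), y = c := by
      intro y hy
      have := List.mem_takeWhile_imp hy
      simpa using this
    have hcle : ∀ y ∈ rest, c ≤ y := (List.pairwise_cons.1 hs).1
    have hdrop_sorted : (rest.dropWhile (fun x => x == c)).Pairwise (· ≤ ·) :=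
      ((List.pairwise_cons.1 hs).2).sublist (List.dropWhile_sublist _)
    have hdrop_ne : ∀ y ∈ rest.dropWhile (fun x => x == c), c < y := by
      intro y hy
      cases hd : rest.dropWhile (fun x => x == c) with
      | nil => rw [hd] at hy; exact absurd hy (List.not_mem_nil)
      | cons a t =>
        have ha : ((a : Int) == c) = false := by
          have h0 := List.head?_dropWhile_not (fun x => x == c) rest
          rw [hd] at h0
          simpa using h0
        have hane : a ≠ c := by simpa using ha
        have hac : c < a :=
          lt_of_le_of_ne (hcle a ((List.dropWhile_sublist _).mem (by rw [hd]; exact List.mem_cons_self))) (Ne.symm hane)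
        rw [hd] at hy
        rcases List.mem_cons.1 hy with rfl | hy'
        · exact hac
        · have hat : List.Pairwise (· ≤ ·) (a :: t) := hd ▸ hdrop_sorted
          exact lt_of_lt_of_le hac ((List.pairwise_cons.1 hat).1 y hy')
    have hcnt_c : List.count c rest
        = (rest.takeWhile (fun x => x == c)).length := by
      conv_lhs => rw [hrest]
      rw [List.count_append]
      have h1 : List.count c (rest.takeWhile (fun x => x == c))
          = (rest.takeWhile (fun x => x == c)).length :=
        List.count_eq_length.2 (fun y hy => by simp [htake y hy])
      have h2 : List.count c (rest.dropWhile (fun x => x == c)) = 0 :=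
        List.count_eq_zero.2 (fun h => lt_irrefl c (hdrop_ne c h))
      omega
    rw [runDoubles, List.mem_append]
    by_cases hx : x = c
    · subst hx
      have hnot : x ∉ runDoubles (rest.dropWhile (fun y => y == x)) := by
        intro h
        exact lt_irrefl x (hdrop_ne x (runDoubles_subset _ x h))
      constructor
      · rintro (h | h)
        · split at h
          · rename_i hlen
            simp [hcnt_c, hlen]
          · simp at h
        · exact absurd h hnot
      · intro h
        left
        have : (rest.takeWhile (fun y => y == x)).length + 1 = 2 := by
          simp [hcnt_c] at h
          omega
        simp [this]
    · have hcnt : List.count x (c :: rest)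
          = List.count x (rest.dropWhile (fun y => y == c)) := by
        conv_lhs => rw [show c :: rest = c :: (rest.takeWhile (fun y => y == c) ++ rest.dropWhile (fun y => y == c)) from by rw [← hrest]]
        rw [List.count_cons, List.count_append]
        have h1 : List.count x (rest.takeWhile (fun y => y == c)) = 0 :=
          List.count_eq_zero.2 (fun h => hx (htake x h))
        simp [h1, Ne.symm hx]
      rw [hcnt]
      constructor
      · rintro (h | h)
        · exfalso
          split at h
          · simp at h
            exact hx h
          · simp at h
        · exact (ih hdrop_sorted).1 h
      · intro h
        right
        exact (ih hdrop_sorted).2 h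

-- the two pair predicates agree pointwise
theorem doubles_contains_eq (tgt : List Int) (x : Int) :
    (runDoubles (PySem.List.sorted tgt (fun x => x) false)).contains x
      = (PySem.List.count tgt x == 2) := by
  have hperm : (PySem.List.sorted tgt (fun x => x) false).Perm tgt :=
    PySem.List.sorted_perm tgt (fun x => x) false
  have hcount : List.count x (PySem.List.sorted tgt (fun x => x) false) = List.count x tgt :=
    hperm.count_eq x
  have hmem := mem_runDoubles_iff_count _
    (by simpa using PySem.List.sorted_pairwise tgt (fun x => x)) x
  rw [hcount] at hmem
  by_cases h : List.count x tgt = 2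
  · simp [hmem, h, PySem.List.count]
  · simp [hmem, h, PySem.List.count]

-- ===== VERDICT (by name: the statement is the Claim_ definition above) =====
theorem divide_suit_spec : Claim_equal_divide_suit := by
  intro tgt _
  unfold Spec_divide_suit
  simp only [divide_suit, divide_suit_alt]
  have hA := divide_suit_loop_inv tgt tgt []
  simp only [List.filter_nil] at hA
  rw [hA]
  have hB := alt_dedup_inv tgt []
  rw [show (PySem.Set.empty : PySem.Set Int) = ([] : List Int) from rfl]
  rw [hB]
  refine Prod.ext rfl ?_
  exact List.filter_congr (fun x _ => (doubles_contains_eq tgt x).symm)
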